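-- pv_equiv track=rewrite | github.com/LounesMD/LeetCode | problems/algorithms/1930_length_3_palindromic_substring.py | countPalindromicSubsequence_n3
-- ===== SOURCE A (Python) =====
-- def countPalindromicSubsequence_n3(s: str) -> int:
--     if len(s) < 3:
--         return 0
--     cpt = 0
--     left = s[0]
--     right = s[2:]
--     n = len(s)
--     elt = []
--     for char in s[1:n-1]:
--         for l in left:
--             for r in right:
--                 if l == r and (l+char+r not in elt):
--                     cpt += 1
--                     elt.append(l+char+r)
--         left += char
--         right = right[1:]
--     return cpt
-- ===== SOURCE B (Python) =====
-- def countPalindromicSubsequence_n3(s: str) -> int: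
--     cs = list(s)
--     total = 0
--     for x in set(cs):
--         i = cs.index(x)
--         j = len(cs) - 1 - cs[::-1].index(x)
--         if j - i >= 2:
--             total += len(set(cs[i + 1:j]))
--     return total
-- ===== Notes on version B (the rewrite author's own statement) =====
-- stated objective: faster
-- what changed: Replaced the O(n^3)-ish triple loop with dedup-list membership tests by the classic per-letter scheme: for each distinct letter take its first and last occurrence and add the number of distinct characters strictly between them.
import Mathlib
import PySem

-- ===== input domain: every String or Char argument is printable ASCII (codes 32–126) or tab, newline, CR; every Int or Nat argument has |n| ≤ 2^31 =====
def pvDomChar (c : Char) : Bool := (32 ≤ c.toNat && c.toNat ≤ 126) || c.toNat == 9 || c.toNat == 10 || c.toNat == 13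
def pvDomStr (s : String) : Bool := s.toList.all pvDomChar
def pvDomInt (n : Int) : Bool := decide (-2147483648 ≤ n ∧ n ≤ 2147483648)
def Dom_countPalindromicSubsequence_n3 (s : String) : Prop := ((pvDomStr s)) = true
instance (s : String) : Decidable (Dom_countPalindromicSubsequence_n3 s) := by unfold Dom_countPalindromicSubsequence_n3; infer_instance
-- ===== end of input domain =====

-- B replaces A's triple loop with a dedup list by the per-letter first/last-occurrence scheme
-- (objective: faster; a timing run measures the speed-up).

-- ===== PORT A =====
-- Literal port of A. The strings l+char+r that A stores in `elt` are length-3 string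
-- concatenations; they are ported as their character lists [l, char, r] (string
-- concatenation/equality is exactly list concatenation/equality of the chars, per PySem.Chars).
-- s[0] is cs.take 1 (a 1-char string), s[2:] is cs.drop 2 and right[1:] is right.drop 1
-- (PySem.List.slice_from_natCast / slice_from_one); s[1:n-1] is PySem.List.slice.
def countPalindromicSubsequence_n3 (s : String) : Int :=
  let cs := s.toList
  if PySem.Str.len s < 3 then 0
  else
    let n := cs.length
    let st := (PySem.List.slice cs (some 1) (some ((n : Int) - 1))).foldl
      (fun (st : Int × List (List Char) × List Char × List Char) char =>
        let p := st.2.2.1.foldl (fun p l =>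
          st.2.2.2.foldl (fun (p : Int × List (List Char)) r =>
            if l = r ∧ [l, char, r] ∉ p.2 then (p.1 + 1, p.2 ++ [[l, char, r]]) else p) p)
          (st.1, st.2.1)
        (p.1, p.2, st.2.2.1 ++ [char], st.2.2.2.drop 1))
      (0, [], cs.take 1, cs.drop 2)
    st.1

-- ===== PORT B =====
-- Literal port of B (Source B). cs.index(x) for the member x is List.idxOf; cs[::-1] is
-- cs.reverse; set(...) is PySem.Set.ofList (the sum over it is order-independent);
-- cs[i+1:j] is PySem.List.slice.
def countPalindromicSubsequence_n3_alt (s : String) : Int :=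
  let cs := s.toList
  (PySem.Set.ofList cs).foldl (fun total x =>
    let i := cs.idxOf x
    let j := cs.length - 1 - cs.reverse.idxOf x
    if (j : Int) - (i : Int) ≥ 2 then
      total + PySem.Set.len (PySem.Set.ofList (PySem.List.slice cs (some ((i : Int) + 1)) (some (j : Int))))
    else total) 0

-- ===== PRECONDITION & SPEC =====
def Spec_countPalindromicSubsequence_n3 (s : String) (out : Int) : Prop := out = countPalindromicSubsequence_n3_alt s
instance (s : String) (out : Int) : Decidable (Spec_countPalindromicSubsequence_n3 s out) := by unfold Spec_countPalindromicSubsequence_n3; infer_instance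

-- ===== CLAIM (what is proved, stated in full; the proofs are below) =====
def Claim_equal_countPalindromicSubsequence_n3 : Prop := ∀ (s : String), Dom_countPalindromicSubsequence_n3 s → Spec_countPalindromicSubsequence_n3 s (countPalindromicSubsequence_n3 s)

-- ===== LEMMAS AND PROOFS =====

theorem pv_innerR (c l : Char) (right : List Char) :
    ∀ p : Int × List (List Char), p.1 = (p.2.length : Int) → p.2.Nodup →
    (let q := right.foldl (fun (p : Int × List (List Char)) r =>
        if l = r ∧ [l, c, r] ∉ p.2 then (p.1 + 1, p.2 ++ [[l, c, r]]) else p) p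
     q.1 = (q.2.length : Int) ∧ q.2.Nodup ∧
       ∀ v, v ∈ q.2 ↔ v ∈ p.2 ∨ ∃ r ∈ right, l = r ∧ v = [l, c, r]) := by
  induction right with
  | nil => intro p h1 h2; exact ⟨h1, h2, fun v => by simp⟩
  | cons r rs ih =>
    intro p h1 h2
    simp only [List.foldl_cons]
    by_cases hc : l = r ∧ [l, c, r] ∉ p.2
    · rw [if_pos hc]
      obtain ⟨q1, q2, q3⟩ := ih (p.1 + 1, p.2 ++ [[l, c, r]])
        (by simp [h1])
        (by simp [List.nodup_append, h2]; exact fun a ha he => hc.2 (he ▸ ha))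
      refine ⟨q1, q2, fun v => ?_⟩
      rw [q3 v]
      simp only [List.mem_append, List.mem_cons, List.not_mem_nil, or_false]
      constructor
      · rintro ((h | h) | ⟨r', hr', he, hv⟩)
        · exact Or.inl h
        · exact Or.inr ⟨r, Or.inl rfl, hc.1, h⟩
        · exact Or.inr ⟨r', Or.inr hr', he, hv⟩
      · rintro (h | ⟨r', hr' | hr', he, hv⟩)
        · exact Or.inl (Or.inl h)
        · subst hr'; exact Or.inl (Or.inr hv)
        · exact Or.inr ⟨r', hr', he, hv⟩
    · rw [if_neg hc]
      obtain ⟨q1, q2, q3⟩ := ih p h1 h2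
      refine ⟨q1, q2, fun v => ?_⟩
      rw [q3 v]
      constructor
      · rintro (h | ⟨r', hr', he, hv⟩)
        · exact Or.inl h
        · exact Or.inr ⟨r', List.mem_cons_of_mem _ hr', he, hv⟩
      · rintro (h | ⟨r', hr', he, hv⟩)
        · exact Or.inl h
        · rcases List.mem_cons.mp hr' with h' | h'
          · subst h'
            have hin : [l, c, r'] ∈ p.2 := by
              by_contra hnin
              exact hc ⟨he, hnin⟩
            exact Or.inl (hv ▸ hin)
          · exact Or.inr ⟨r', h', he, hv⟩

theorem pv_innerL (c : Char) (left right : List Char) :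
    ∀ p : Int × List (List Char), p.1 = (p.2.length : Int) → p.2.Nodup →
    (let q := left.foldl (fun (p : Int × List (List Char)) l =>
        right.foldl (fun (p : Int × List (List Char)) r =>
          if l = r ∧ [l, c, r] ∉ p.2 then (p.1 + 1, p.2 ++ [[l, c, r]]) else p) p) p
     q.1 = (q.2.length : Int) ∧ q.2.Nodup ∧
       ∀ v, v ∈ q.2 ↔ v ∈ p.2 ∨ ∃ l ∈ left, ∃ r ∈ right, l = r ∧ v = [l, c, r]) := by
  induction left with
  | nil => intro p h1 h2; exact ⟨h1, h2, fun v => by simp⟩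
  | cons l ls ih =>
    intro p h1 h2
    simp only [List.foldl_cons]
    obtain ⟨r1, r2, r3⟩ := pv_innerR c l right p h1 h2
    obtain ⟨q1, q2, q3⟩ := ih _ r1 r2
    refine ⟨q1, q2, fun v => ?_⟩
    rw [q3 v, r3 v]
    constructor
    · rintro ((h | ⟨r', hr', he, hv⟩) | ⟨l', hl', r', hr', he, hv⟩)
      · exact Or.inl h
      · exact Or.inr ⟨l, List.mem_cons_self, r', hr', he, hv⟩
      · exact Or.inr ⟨l', List.mem_cons_of_mem _ hl', r', hr', he, hv⟩
    · rintro (h | ⟨l', hl', r', hr', he, hv⟩)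
      · exact Or.inl (Or.inl h)
      · rcases List.mem_cons.mp hl' with h' | h'
        · subst h'; exact Or.inl (Or.inr ⟨r', hr', he, hv⟩)
        · exact Or.inr ⟨l', h', r', hr', he, hv⟩

theorem pv_mem_take (l : List Char) (t : Nat) (v : Char) :
    v ∈ l.take t ↔ ∃ m, m < t ∧ l[m]? = some v := by
  rw [List.mem_iff_getElem]
  constructor
  · rintro ⟨k, hk, he⟩
    have hkl : k < l.length := by simp at hk; omega
    exact ⟨k, by simp at hk; omega, by rw [List.getElem?_eq_getElem hkl, ← he, List.getElem_take]⟩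
  · rintro ⟨m, hmt, he⟩
    have hml : m < l.length := by
      by_contra hc; rw [List.getElem?_eq_none (by omega)] at he; simp at he
    refine ⟨m, by simp; omega, ?_⟩
    rw [List.getElem_take]
    simpa [List.getElem?_eq_getElem hml] using he
theorem pv_mem_drop (l : List Char) (t : Nat) (v : Char) :
    v ∈ l.drop t ↔ ∃ m, t ≤ m ∧ l[m]? = some v := by
  rw [List.mem_iff_getElem]
  constructor
  · rintro ⟨k, hk, he⟩
    have hkl : t + k < l.length := by simp at hk; omega
    exact ⟨t + k, by omega, by rw [List.getElem?_eq_getElem hkl, ← he, List.getElem_drop]⟩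
  · rintro ⟨m, htm, he⟩
    have hml : m < l.length := by
      by_contra hc; rw [List.getElem?_eq_none (by omega)] at he; simp at he
    refine ⟨m - t, by simp; omega, ?_⟩
    have : t + (m - t) = m := by omega
    rw [List.getElem_drop]
    simp only [this]
    simpa [List.getElem?_eq_getElem hml] using he

def pvGoodUpto (cs : List Char) (t : Nat) (x y : Char) : Bool :=
  (List.range t).any fun j =>
    (cs[j]? == some y) &&
    ((List.range j).any fun i => cs[i]? == some x) &&
    ((List.range cs.length).any fun k => decide (j < k) && (cs[k]? == some x))

theorem pvGoodUpto_iff (cs : List Char) (t : Nat) (x y : Char) :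
    pvGoodUpto cs t x y = true ↔
      ∃ j, j < t ∧ cs[j]? = some y ∧
        (∃ i, i < j ∧ cs[i]? = some x) ∧
        (∃ k, j < k ∧ cs[k]? = some x) := by
  simp only [pvGoodUpto, List.any_eq_true, List.mem_range, Bool.and_eq_true, beq_iff_eq,
    decide_eq_true_eq]
  constructor
  · rintro ⟨j, hjt, ⟨hy, i, hij, hx⟩, k, hk, hjk, hxk⟩
    exact ⟨j, hjt, hy, ⟨i, hij, hx⟩, k, hjk, hxk⟩
  · rintro ⟨j, hjt, hy, ⟨i, hij, hx⟩, k, hjk, hxk⟩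
    have hkl : k < cs.length := by
      by_contra hc
      rw [List.getElem?_eq_none (by omega)] at hxk
      simp at hxk
    exact ⟨j, hjt, ⟨hy, i, hij, hx⟩, k, hkl, hjk, hxk⟩

theorem pvGoodUpto_succ (cs : List Char) (t : Nat) (x y : Char) :
    (pvGoodUpto cs (t + 1) x y = true) ↔
      pvGoodUpto cs t x y = true ∨
        (cs[t]? = some y ∧ (∃ i, i < t ∧ cs[i]? = some x) ∧ (∃ k, t < k ∧ cs[k]? = some x)) := by
  simp only [pvGoodUpto_iff]
  constructor
  · rintro ⟨j, hjt, hy, hi, hk⟩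
    rcases Nat.lt_or_ge j t with h | h
    · exact Or.inl ⟨j, h, hy, hi, hk⟩
    · have : j = t := by omega
      subst this; exact Or.inr ⟨hy, hi, hk⟩
  · rintro (⟨j, hjt, hy, hi, hk⟩ | ⟨hy, hi, hk⟩)
    · exact ⟨j, by omega, hy, hi, hk⟩
    · exact ⟨t, by omega, hy, hi, hk⟩

theorem pv_outer (cs : List Char) :
    ∀ (cnt t : Nat) (cpt : Int) (elt : List (List Char)),
    t + cnt + 1 = cs.length →
    cpt = (elt.length : Int) → elt.Nodup →
    (∀ v, v ∈ elt ↔ ∃ x y, pvGoodUpto cs t x y = true ∧ v = [x, y, x]) →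
    (let res := ((cs.drop t).take cnt).foldl
      (fun (st : Int × List (List Char) × List Char × List Char) char =>
        let p := st.2.2.1.foldl (fun p l =>
          st.2.2.2.foldl (fun (p : Int × List (List Char)) r =>
            if l = r ∧ [l, char, r] ∉ p.2 then (p.1 + 1, p.2 ++ [[l, char, r]]) else p) p)
          (st.1, st.2.1)
        (p.1, p.2, st.2.2.1 ++ [char], st.2.2.2.drop 1))
      (cpt, elt, cs.take t, cs.drop (t+1))
     res.1 = (res.2.1.length : Int) ∧ res.2.1.Nodup ∧
       ∀ v, v ∈ res.2.1 ↔ ∃ x y, pvGoodUpto cs (t + cnt) x y = true ∧ v = [x, y, x]) := by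
  intro cnt
  induction cnt with
  | zero =>
    intro t cpt elt hn h1 h2 h3
    simpa using ⟨h1, h2, h3⟩
  | succ c ihc =>
    intro t cpt elt hn h1 h2 h3
    have ht : t < cs.length := by omega
    have hseg : (cs.drop t).take (c + 1) = cs[t] :: ((cs.drop (t+1)).take c) := by
      rw [List.drop_eq_getElem_cons ht]; rfl
    simp only [hseg, List.foldl_cons]
    obtain ⟨p1, p2, p3⟩ := pv_innerL cs[t] (cs.take t) (cs.drop (t+1)) (cpt, elt) h1 h2
    have hleft : cs.take t ++ [cs[t]] = cs.take (t+1) := List.take_append_getElem ht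
    have hright : (cs.drop (t+1)).drop 1 = cs.drop (t+1+1) := by
      rw [List.drop_drop]
    have hmem : ∀ v,
        v ∈ (((cs.take t).foldl (fun p l =>
          (cs.drop (t+1)).foldl (fun (p : Int × List (List Char)) r =>
            if l = r ∧ [l, cs[t], r] ∉ p.2 then (p.1 + 1, p.2 ++ [[l, cs[t], r]]) else p) p)
          (cpt, elt))).2 ↔ ∃ x y, pvGoodUpto cs (t+1) x y = true ∧ v = [x, y, x] := by
      intro v
      rw [p3 v]
      constructor
      · rintro (h | ⟨l', hl', r', hr', he, hv⟩)
        · obtain ⟨x, y, hg, hv⟩ := (h3 v).mp h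
          refine ⟨x, y, ?_, hv⟩
          rw [pvGoodUpto_succ]; exact Or.inl hg
        · subst he
          obtain ⟨i, hit, hiv⟩ := (pv_mem_take cs t l').mp hl'
          obtain ⟨k, hkt, hkv⟩ := (pv_mem_drop cs (t+1) l').mp hr'
          refine ⟨l', cs[t], ?_, hv⟩
          rw [pvGoodUpto_succ]
          exact Or.inr ⟨by simp [List.getElem?_eq_getElem ht], ⟨i, hit, hiv⟩, ⟨k, by omega, hkv⟩⟩
      · rintro ⟨x, y, hg, hv⟩
        rw [pvGoodUpto_succ] at hg
        rcases hg with hg | ⟨hy, ⟨i, hit, hiv⟩, ⟨k, hkt, hkv⟩⟩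
        · exact Or.inl ((h3 v).mpr ⟨x, y, hg, hv⟩)
        · have hyv : y = cs[t] := by
            rw [List.getElem?_eq_getElem ht] at hy; exact (Option.some_injective _ hy).symm
          refine Or.inr ⟨x, (pv_mem_take cs t x).mpr ⟨i, hit, hiv⟩,
            x, (pv_mem_drop cs (t+1) x).mpr ⟨k, by omega, hkv⟩, rfl, by rw [hv, hyv]⟩
    have := ihc (t+1) _ _ (by omega) p1 p2 hmem
    rw [hleft, hright]
    have harr : t + 1 + c = t + (c + 1) := by omega
    rw [harr] at this
    exact this

def pvRef (cs : List Char) : Nat :=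
  ((cs.toFinset ×ˢ cs.toFinset).filter fun p => pvGoodUpto cs cs.length p.1 p.2).card

theorem pvGoodUpto_pred (cs : List Char) (x y : Char) :
    pvGoodUpto cs cs.length x y = pvGoodUpto cs (cs.length - 1) x y := by
  rcases (Bool.eq_false_or_eq_true (pvGoodUpto cs (cs.length - 1) x y)).symm with h | h
  · rw [h, Bool.eq_false_iff]
    intro hc
    rw [Bool.eq_false_iff] at h
    apply h
    rw [pvGoodUpto_iff] at hc ⊢
    obtain ⟨j, hjt, hy, hi, k, hjk, hkv⟩ := hc
    have hkl : k < cs.length := by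
      by_contra hcc; rw [List.getElem?_eq_none (by omega)] at hkv; simp at hkv
    exact ⟨j, by omega, hy, hi, k, hjk, hkv⟩
  · rw [h]
    rw [pvGoodUpto_iff] at h ⊢
    obtain ⟨j, hjt, hy, hi, hk⟩ := h
    exact ⟨j, by omega, hy, hi, hk⟩

theorem pv_count (cs : List Char) (elt : List (List Char)) (hnd : elt.Nodup)
    (hmem : ∀ v, v ∈ elt ↔ ∃ x y, pvGoodUpto cs cs.length x y = true ∧ v = [x, y, x]) :
    elt.length = pvRef cs := by
  have himg : elt.toFinset =
      ((cs.toFinset ×ˢ cs.toFinset).filter fun p => pvGoodUpto cs cs.length p.1 p.2).image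
        (fun p => [p.1, p.2, p.1]) := by
    ext v
    simp only [List.mem_toFinset, Finset.mem_image, Finset.mem_filter, Finset.mem_product,
      List.mem_toFinset]
    rw [hmem v]
    constructor
    · rintro ⟨x, y, hg, hv⟩
      obtain ⟨j, _, hy, ⟨i, _, hx⟩, _⟩ := (pvGoodUpto_iff cs cs.length x y).mp hg
      exact ⟨(x, y), ⟨⟨List.mem_of_getElem? hx, List.mem_of_getElem? hy⟩, hg⟩, hv.symm⟩
    · rintro ⟨⟨x, y⟩, ⟨⟨_, _⟩, hg⟩, hv⟩
      exact ⟨x, y, hg, hv.symm⟩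
  have hinj : Function.Injective (fun p : Char × Char => [p.1, p.2, p.1]) := by
    rintro ⟨a, b⟩ ⟨c, d⟩ h; simp at h; simp [h.1, h.2.1]
  calc elt.length = elt.toFinset.card := (List.toFinset_card_of_nodup hnd).symm
    _ = _ := by rw [himg, Finset.card_image_of_injective _ hinj]; rfl


theorem pvRef_eq_zero_of_short (cs : List Char) (h : cs.length < 3) : pvRef cs = 0 := by
  unfold pvRef
  rw [Finset.card_eq_zero, Finset.filter_eq_empty_iff]
  rintro ⟨x, y⟩ _
  simp only [Bool.not_eq_true]
  rw [Bool.eq_false_iff]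
  intro hg
  obtain ⟨j, hjt, hy, ⟨i, hij, _⟩, k, hjk, hkv⟩ := (pvGoodUpto_iff cs cs.length x y).mp hg
  have hkl : k < cs.length := by
    by_contra hcc; rw [List.getElem?_eq_none (by omega)] at hkv; simp at hkv
  omega

theorem countPalindromicSubsequence_n3_eq_ref (s : String) :
    countPalindromicSubsequence_n3 s = (pvRef s.toList : Int) := by
  set cs := s.toList with hcs
  by_cases hlen : cs.length < 3
  · rw [countPalindromicSubsequence_n3]
    rw [if_pos (by simp [PySem.Str.len_eq, ← hcs]; omega), pvRef_eq_zero_of_short cs hlen]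
    simp
  · rw [Nat.not_lt] at hlen
    rw [countPalindromicSubsequence_n3]
    rw [if_neg (by simp [PySem.Str.len_eq, ← hcs]; omega)]
    have hslice : PySem.List.slice cs (some 1) (some ((cs.length : Int) - 1)) =
        (cs.drop 1).take (cs.length - 1 - 1) := by
      have h1 : ((cs.length : Int) - 1) = ((cs.length - 1 : Nat) : Int) := by
        push_cast [Nat.cast_sub (by omega : 1 ≤ cs.length)]; ring
      rw [h1]
      exact_mod_cast PySem.List.slice_natCast cs 1 (cs.length - 1)
    simp only [← hcs, hslice]
    have hdrop2 : cs.drop 2 = cs.drop (1 + 1) := by norm_num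
    have h0 : ∀ v : List Char, v ∈ ([] : List (List Char)) ↔
        ∃ x y, pvGoodUpto cs 1 x y = true ∧ v = [x, y, x] := by
      intro v
      simp only [List.not_mem_nil, false_iff]
      rintro ⟨x, y, hg, _⟩
      obtain ⟨j, hjt, _, ⟨i, hij, _⟩, _⟩ := (pvGoodUpto_iff cs 1 x y).mp hg
      omega
    have := pv_outer cs (cs.length - 1 - 1) 1 0 [] (by omega) (by simp) List.nodup_nil h0
    rw [hdrop2]
    obtain ⟨r1, r2, r3⟩ := this
    rw [r1]
    congr 1
    have harr : 1 + (cs.length - 1 - 1) = cs.length - 1 := by omega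
    rw [harr] at r3
    apply pv_count cs _ r2
    intro v
    rw [r3 v]
    constructor
    · rintro ⟨x, y, hg, hv⟩; exact ⟨x, y, by rw [pvGoodUpto_pred]; exact hg, hv⟩
    · rintro ⟨x, y, hg, hv⟩; exact ⟨x, y, by rw [← pvGoodUpto_pred]; exact hg, hv⟩


theorem pv_idxOf_le (l : List Char) (x : Char) (m : Nat) (hm : m < l.length) (h : l[m] = x) : l.idxOf x ≤ m := by
  have hx : x ∈ l.take (m+1) := by
    have : (l.take (m+1))[m]'(by simp; omega) ∈ l.take (m+1) := List.getElem_mem _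
    simpa [List.getElem_take, h] using this
  have h1 : l.idxOf x = (l.take (m+1)).idxOf x := by
    conv_lhs => rw [← List.take_append_drop (m+1) l]
    rw [List.idxOf_append, if_pos hx]
  have h2 := List.idxOf_lt_length_of_mem hx
  simp [List.length_take] at h2
  omega

-- the slice cs[a : a+b] holds exactly the cs[m] with a ≤ m < a + b
theorem pv_mem_drop_take (l : List Char) (a b : Nat) (v : Char) :
    v ∈ (l.drop a).take b ↔ ∃ m, a ≤ m ∧ m < a + b ∧ l[m]? = some v := by
  rw [pv_mem_take]
  constructor
  · rintro ⟨m, hmb, he⟩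
    rw [List.getElem?_drop] at he
    exact ⟨a + m, by omega, by omega, he⟩
  · rintro ⟨m, ham, hmb, he⟩
    refine ⟨m - a, by omega, ?_⟩
    rw [List.getElem?_drop]
    have : a + (m - a) = m := by omega
    rw [this]; exact he

theorem pv_goodAll_iff_between (cs : List Char) (x : Char) (hx : x ∈ cs) (y : Char) :
    pvGoodUpto cs cs.length x y = true ↔
      ∃ m, cs.idxOf x < m ∧ m < cs.length - 1 - cs.reverse.idxOf x ∧ cs[m]? = some y := by
  set i := cs.idxOf x with hi
  set ri := cs.reverse.idxOf x with hri
  set j := cs.length - 1 - ri with hj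
  have hil : i < cs.length := List.idxOf_lt_length_of_mem hx
  have hxi : cs[i] = x := List.getElem_idxOf hil
  have hrl : ri < cs.length := by
    have := List.idxOf_lt_length_of_mem (List.mem_reverse.mpr hx)
    simpa using this
  have hxj : cs[j]'(by omega) = x := by
    have h1 : cs.reverse[ri]'(by simpa using hrl) = x :=
      List.getElem_idxOf (by simpa using hrl)
    rw [List.getElem_reverse] at h1
    exact h1
  have hmax : ∀ m (hm : m < cs.length), cs[m] = x → m ≤ j := by
    intro m hm he
    have h1 : cs.reverse[cs.length - 1 - m]'(by simp; omega) = x := by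
      rw [List.getElem_reverse]
      have : cs.length - 1 - (cs.length - 1 - m) = m := by omega
      simp_rw [this]
      exact he
    have := pv_idxOf_le cs.reverse x (cs.length - 1 - m) (by simp; omega) h1
    omega
  rw [pvGoodUpto_iff]
  constructor
  · rintro ⟨j', hjt, hy, ⟨i', hij, hxi'⟩, k, hjk, hxk⟩
    have hi'l : i' < cs.length := by omega
    have hkl : k < cs.length := by
      by_contra hc; rw [List.getElem?_eq_none (by omega)] at hxk; simp at hxk
    have h1 : i ≤ i' := pv_idxOf_le cs x i' hi'l (by simpa [List.getElem?_eq_getElem hi'l] using hxi')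
    have h2 : k ≤ j := hmax k hkl (by simpa [List.getElem?_eq_getElem hkl] using hxk)
    exact ⟨j', by omega, by omega, hy⟩
  · rintro ⟨m, him, hmj, hy⟩
    refine ⟨m, by omega, hy, ⟨i, him, by simp [List.getElem?_eq_getElem hil, hxi]⟩,
      ⟨j, by omega, by simp [List.getElem?_eq_getElem (by omega : j < cs.length), hxj]⟩⟩

theorem pv_setLen_toFinset (l : List Char) :
    PySem.Set.len (PySem.Set.ofList l) = (l.toFinset.card : Int) := by
  have h1 : (PySem.Set.ofList l).toFinset = l.toFinset := by
    ext v; simp [PySem.Set.mem_ofList]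
  have h2 : (PySem.Set.ofList l).length = (PySem.Set.ofList l).toFinset.card :=
    (List.toFinset_card_of_nodup (PySem.Set.nodup_ofList l)).symm
  simp [PySem.Set.len, h2, h1]


theorem pv_contrib (cs : List Char) (x : Char) (hx : x ∈ cs) :
    (if ((cs.length - 1 - cs.reverse.idxOf x : Nat) : Int) - (cs.idxOf x : Int) ≥ 2 then
        PySem.Set.len (PySem.Set.ofList (PySem.List.slice cs (some ((cs.idxOf x : Int) + 1))
          (some ((cs.length - 1 - cs.reverse.idxOf x : Nat) : Int))))
      else 0) =
      ((cs.toFinset.filter fun y => pvGoodUpto cs cs.length x y).card : Int) := by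
  set i := cs.idxOf x with hi
  set j := cs.length - 1 - cs.reverse.idxOf x with hj
  by_cases hcond : ((j : Int) - (i : Int) ≥ 2)
  · rw [if_pos hcond]
    have hslice : PySem.List.slice cs (some ((i : Int) + 1)) (some (j : Int)) =
        (cs.drop (i+1)).take (j - (i+1)) := by
      have h1 : ((i : Int) + 1) = (((i+1 : Nat)) : Int) := by push_cast; ring
      rw [h1]
      exact_mod_cast PySem.List.slice_natCast cs (i+1) j
    rw [hslice, pv_setLen_toFinset]
    congr 2
    ext y
    simp only [List.mem_toFinset, Finset.mem_filter, List.mem_toFinset]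
    rw [pv_mem_drop_take, pv_goodAll_iff_between cs x hx y]
    constructor
    · rintro ⟨m, ham, hmb, he⟩
      have hml : m < cs.length := by
        by_contra hc; rw [List.getElem?_eq_none (by omega)] at he; simp at he
      exact ⟨List.mem_of_getElem? he, m, by omega, by omega, he⟩
    · rintro ⟨_, m, him, hmj, he⟩
      exact ⟨m, by omega, by omega, he⟩
  · rw [if_neg hcond]
    have hempty : (cs.toFinset.filter fun y => pvGoodUpto cs cs.length x y) = ∅ := by
      rw [Finset.filter_eq_empty_iff]
      intro y _ hg
      obtain ⟨m, him, hmj, _⟩ := (pv_goodAll_iff_between cs x hx y).mp (by simpa using hg)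
      omega
    rw [hempty]
    simp

theorem pvRef_eq_sum (cs : List Char) :
    pvRef cs = ∑ x ∈ cs.toFinset, (cs.toFinset.filter fun y => pvGoodUpto cs cs.length x y).card := by
  unfold pvRef
  rw [Finset.card_filter, Finset.sum_product]
  exact Finset.sum_congr rfl fun x _ => (Finset.card_filter _ _).symm

theorem countPalindromicSubsequence_n3_alt_eq_ref (s : String) :
    countPalindromicSubsequence_n3_alt s = (pvRef s.toList : Int) := by
  set cs := s.toList with hcs
  rw [countPalindromicSubsequence_n3_alt]
  simp only [← hcs]
  have hfun : (PySem.Set.ofList cs).foldl (fun total x =>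
      let i := cs.idxOf x
      let j := cs.length - 1 - cs.reverse.idxOf x
      if (j : Int) - (i : Int) ≥ 2 then
        total + PySem.Set.len (PySem.Set.ofList (PySem.List.slice cs (some ((i : Int) + 1)) (some (j : Int))))
      else total) 0 =
      (PySem.Set.ofList cs).foldl (fun total x => total +
        (if ((cs.length - 1 - cs.reverse.idxOf x : Nat) : Int) - (cs.idxOf x : Int) ≥ 2 then
          PySem.Set.len (PySem.Set.ofList (PySem.List.slice cs (some ((cs.idxOf x : Int) + 1))
            (some ((cs.length - 1 - cs.reverse.idxOf x : Nat) : Int))))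
        else 0)) 0 := by
    apply PySem.List.foldl_congr_mem
    intro a x _
    dsimp only
    split <;> simp
  rw [hfun, PySem.List.foldl_add, zero_add]
  have hsum : ((PySem.Set.ofList cs).map (fun x =>
      (if ((cs.length - 1 - cs.reverse.idxOf x : Nat) : Int) - (cs.idxOf x : Int) ≥ 2 then
        PySem.Set.len (PySem.Set.ofList (PySem.List.slice cs (some ((cs.idxOf x : Int) + 1))
          (some ((cs.length - 1 - cs.reverse.idxOf x : Nat) : Int))))
      else 0))).sum =
      ∑ x ∈ cs.toFinset, ((cs.toFinset.filter fun y => pvGoodUpto cs cs.length x y).card : Int) := by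
    rw [← List.sum_toFinset _ (PySem.Set.nodup_ofList cs)]
    have hfs : (PySem.Set.ofList cs).toFinset = cs.toFinset := by
      ext v; simp [PySem.Set.mem_ofList]
    rw [hfs]
    refine Finset.sum_congr rfl fun x hxm => ?_
    exact pv_contrib cs x (List.mem_toFinset.mp hxm)
  rw [hsum, pvRef_eq_sum]
  push_cast
  rfl


-- ===== VERDICT (by name: the statement is the Claim_ definition above) =====
theorem countPalindromicSubsequence_n3_spec : Claim_equal_countPalindromicSubsequence_n3 := by
  intro s _
  unfold Spec_countPalindromicSubsequence_n3
  exact (countPalindromicSubsequence_n3_eq_ref s).trans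
    (countPalindromicSubsequence_n3_alt_eq_ref s).symm
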